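-- pv_equiv track=rewrite | github.com/justincartwright11-alt/ai-risa | run_full_auto_pipeline_recovered_tablepolish.py | hydrate_premium_tactical_fields
-- ===== SOURCE A (Python) =====
-- def hydrate_premium_tactical_fields(prediction, fighter_a_profile, fighter_b_profile, matchup_data, event_summary):
-- 	hydrated = {}
-- 	sources = {}
-- 	winner = prediction.get("predicted_winner", "")
-- 	loser = fighter_b_profile.get("name", "Opponent") if fighter_a_profile and fighter_a_profile.get("name") == winner else fighter_a_profile.get("name", "Opponent") if fighter_b_profile else "Opponent"
-- 	method = prediction.get("method_tendency", "")
-- 	# Deterministic enrichment for each field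
-- 	for field in [
-- 		"decision_structure",
-- 		"energy_use",
-- 		"fatigue_failure_points",
-- 		"mental_condition",
-- 		"collapse_triggers",
-- 		"main_tactical_edge",
-- 		"round_flow_projection",
-- 		"corner_instructions",
-- 		"danger_zones",
-- 	]:
-- 		val = prediction.get(field)
-- 		if val:
-- 			hydrated[field] = val
-- 			sources[field] = "direct"
-- 			continue
-- 		# Inference logic for each field
-- 		if field == "decision_structure":
-- 			if method.lower() == "decision":
-- 				hydrated[field] = f"{winner} is projected to win through cleaner sequencing, superior positional discipline, and steadier round capture rather than volatility."
-- 			else: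
-- 				hydrated[field] = f"{winner} is projected to win by imposing their preferred fight rhythm and capitalizing on key openings."
-- 		elif field == "energy_use":
-- 			hydrated[field] = f"{winner}'s likely path is measured early work, efficient exchanges, and controlled output preservation over the full distance."
-- 		elif field == "fatigue_failure_points":
-- 			hydrated[field] = f"The main risk appears if prolonged clinch disruption or forced attritional rhythm drags {winner} into a less efficient late tempo."
-- 		elif field == "mental_condition":
-- 			hydrated[field] = f"Structured, composed, and process-led; unlikely to chase chaos without reason."
-- 		elif field == "collapse_triggers":
-- 			hydrated[field] = f"Repeated physical disruption, broken rhythm, and sustained pressure at uncomfortable range are the main routes to structural erosion."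
-- 		elif field == "main_tactical_edge":
-- 			hydrated[field] = f"Cleaner decision structure and round-by-round scoring control."
-- 		elif field == "round_flow_projection":
-- 			hydrated[field] = f"Early range establishment, mid-fight widening through cleaner work, late lead protection unless {loser} creates disruption."
-- 		elif field == "corner_instructions":
-- 			hydrated[field] = f"Establish lead-hand control early, deny rhythm breaks, do not overcommit once ahead, and reset immediately after clean scoring sequences."
-- 		elif field == "danger_zones":
-- 			hydrated[field] = f"Clinch disruption, urgency surges from a losing opponent, and any late tempo spike that forces reactive exchanges."
-- 		else:
-- 			hydrated[field] = ""
-- 		sources[field] = "inferred"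
-- 	return hydrated, sources
-- ===== SOURCE B (Python) =====
-- def hydrate_premium_tactical_fields(prediction, fighter_a_profile, fighter_b_profile, matchup_data, event_summary):
-- 	winner = prediction.get("predicted_winner", "")
-- 	loser = fighter_b_profile.get("name", "Opponent") if fighter_a_profile and fighter_a_profile.get("name") == winner else fighter_a_profile.get("name", "Opponent") if fighter_b_profile else "Opponent"
-- 	method = prediction.get("method_tendency", "")
-- 	# start from the full table of inferred defaults, then overlay direct values
-- 	hydrated = {
-- 		"decision_structure": (
-- 			f"{winner} is projected to win through cleaner sequencing, superior positional discipline, and steadier round capture rather than volatility."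
-- 			if method.lower() == "decision" else
-- 			f"{winner} is projected to win by imposing their preferred fight rhythm and capitalizing on key openings."
-- 		),
-- 		"energy_use": f"{winner}'s likely path is measured early work, efficient exchanges, and controlled output preservation over the full distance.",
-- 		"fatigue_failure_points": f"The main risk appears if prolonged clinch disruption or forced attritional rhythm drags {winner} into a less efficient late tempo.",
-- 		"mental_condition": "Structured, composed, and process-led; unlikely to chase chaos without reason.",
-- 		"collapse_triggers": "Repeated physical disruption, broken rhythm, and sustained pressure at uncomfortable range are the main routes to structural erosion.",
-- 		"main_tactical_edge": "Cleaner decision structure and round-by-round scoring control.",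
-- 		"round_flow_projection": f"Early range establishment, mid-fight widening through cleaner work, late lead protection unless {loser} creates disruption.",
-- 		"corner_instructions": "Establish lead-hand control early, deny rhythm breaks, do not overcommit once ahead, and reset immediately after clean scoring sequences.",
-- 		"danger_zones": "Clinch disruption, urgency surges from a losing opponent, and any late tempo spike that forces reactive exchanges.",
-- 	}
-- 	sources = dict.fromkeys(hydrated, "inferred")
-- 	# one pass over the prediction: a truthy value for a known field wins over the default
-- 	for k, v in prediction.items():
-- 		if v and k in hydrated:
-- 			hydrated[k] = v
-- 			sources[k] = "direct"
-- 	return hydrated, sources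
-- ===== Notes on version B (the rewrite author's own statement) =====
-- stated objective: alternative
-- what changed: B builds the full nine-field inferred-defaults table up front and then makes a single pass over the prediction dict's own items, overwriting a default (and flipping its source to 'direct') whenever a truthy value for a known field appears, instead of A's loop over the field list with a per-field prediction lookup feeding a nine-way if-elif inference chain.
import Mathlib
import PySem

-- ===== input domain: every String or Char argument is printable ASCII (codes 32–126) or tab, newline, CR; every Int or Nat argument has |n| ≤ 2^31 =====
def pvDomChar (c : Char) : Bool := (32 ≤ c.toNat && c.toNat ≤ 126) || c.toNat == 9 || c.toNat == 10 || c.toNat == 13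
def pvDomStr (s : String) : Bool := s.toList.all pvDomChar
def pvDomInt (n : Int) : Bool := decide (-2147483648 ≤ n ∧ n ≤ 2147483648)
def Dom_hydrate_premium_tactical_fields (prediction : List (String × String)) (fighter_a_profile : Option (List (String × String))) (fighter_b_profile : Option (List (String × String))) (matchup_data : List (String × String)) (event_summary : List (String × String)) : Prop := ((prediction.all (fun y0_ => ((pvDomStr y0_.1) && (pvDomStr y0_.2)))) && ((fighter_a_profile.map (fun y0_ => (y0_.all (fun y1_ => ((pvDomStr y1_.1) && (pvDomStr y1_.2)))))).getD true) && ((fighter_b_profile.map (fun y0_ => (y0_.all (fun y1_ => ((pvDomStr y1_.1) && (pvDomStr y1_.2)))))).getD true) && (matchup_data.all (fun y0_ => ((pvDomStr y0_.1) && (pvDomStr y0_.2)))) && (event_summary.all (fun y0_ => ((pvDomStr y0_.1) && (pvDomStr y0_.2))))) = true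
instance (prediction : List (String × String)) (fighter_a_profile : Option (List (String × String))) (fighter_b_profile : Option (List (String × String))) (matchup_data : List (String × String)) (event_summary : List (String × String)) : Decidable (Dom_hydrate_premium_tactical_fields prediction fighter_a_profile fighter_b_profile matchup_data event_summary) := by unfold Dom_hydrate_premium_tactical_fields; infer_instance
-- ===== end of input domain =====

-- B replaces A's per-field loop (prediction lookup + nine-way if-elif inference chain) by a
-- precomputed defaults table overlaid in ONE pass over the prediction dict's items (objective:
-- alternative decomposition; same cost).

-- shared template strings (exactly the Python f-string texts, used by both ports)
def pvDsDec (w : String) : String := w ++ " is projected to win through cleaner sequencing, superior positional discipline, and steadier round capture rather than volatility."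
def pvDsOther (w : String) : String := w ++ " is projected to win by imposing their preferred fight rhythm and capitalizing on key openings."
def pvEnergy (w : String) : String := w ++ "'s likely path is measured early work, efficient exchanges, and controlled output preservation over the full distance."
def pvFatigue (w : String) : String := "The main risk appears if prolonged clinch disruption or forced attritional rhythm drags " ++ w ++ " into a less efficient late tempo."
def pvMental : String := "Structured, composed, and process-led; unlikely to chase chaos without reason."
def pvCollapse : String := "Repeated physical disruption, broken rhythm, and sustained pressure at uncomfortable range are the main routes to structural erosion."
def pvEdge : String := "Cleaner decision structure and round-by-round scoring control."
def pvRoundFlow (l : String) : String := "Early range establishment, mid-fight widening through cleaner work, late lead protection unless " ++ l ++ " creates disruption."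
def pvCorner : String := "Establish lead-hand control early, deny rhythm breaks, do not overcommit once ahead, and reset immediately after clean scoring sequences."
def pvDanger : String := "Clinch disruption, urgency surges from a losing opponent, and any late tempo spike that forces reactive exchanges."

-- winner/loser/method are computed by the same Python lines in A and in B; shared helpers.
-- 'fighter_a_profile and fighter_a_profile.get("name") == winner' (None == str is False):
def pvCond1 (fighter_a_profile : Option (List (String × String))) (winner : String) : Bool :=
  match fighter_a_profile with
  | some p => decide (p ≠ []) && ((PySem.Dict.mk p).get? "name" == some winner)
  | none => false

-- loser expression; the 'none => "Opponent"' fallbacks are the inputs where Python raises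
-- AttributeError (excluded by Pre_ below)
def pvLoser (fighter_a_profile fighter_b_profile : Option (List (String × String))) (winner : String) : String :=
  if pvCond1 fighter_a_profile winner then
    match fighter_b_profile with
    | some q => (PySem.Dict.mk q).getD "name" "Opponent"
    | none => "Opponent"
  else if (match fighter_b_profile with | some q => decide (q ≠ []) | none => false) then
    match fighter_a_profile with
    | some p => (PySem.Dict.mk p).getD "name" "Opponent"
    | none => "Opponent"
  else "Opponent"

-- ===== PORT A =====
def pvFields : List String := ["decision_structure", "energy_use", "fatigue_failure_points", "mental_condition", "collapse_triggers", "main_tactical_edge", "round_flow_projection", "corner_instructions", "danger_zones"]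

-- one iteration of A's for-loop ('if val:' truthiness = some non-empty string)
def pvStepA (prediction : List (String × String)) (winner loser method : String)
    (st : PySem.Dict String String × PySem.Dict String String) (field : String) :
    PySem.Dict String String × PySem.Dict String String :=
  let (hydrated, sources) := st
  let val := (PySem.Dict.mk prediction).get? field
  if val.getD "" ≠ "" then
    (hydrated.insert field (val.getD ""), sources.insert field "direct")
  else
    let hydrated :=
      if field = "decision_structure" then
        if PySem.Str.lower method = "decision" then hydrated.insert field (pvDsDec winner)
        else hydrated.insert field (pvDsOther winner)
      else if field = "energy_use" then hydrated.insert field (pvEnergy winner)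
      else if field = "fatigue_failure_points" then hydrated.insert field (pvFatigue winner)
      else if field = "mental_condition" then hydrated.insert field pvMental
      else if field = "collapse_triggers" then hydrated.insert field pvCollapse
      else if field = "main_tactical_edge" then hydrated.insert field pvEdge
      else if field = "round_flow_projection" then hydrated.insert field (pvRoundFlow loser)
      else if field = "corner_instructions" then hydrated.insert field pvCorner
      else if field = "danger_zones" then hydrated.insert field pvDanger
      else hydrated.insert field ""
    (hydrated, sources.insert field "inferred")

def hydrate_premium_tactical_fields (prediction : List (String × String)) (fighter_a_profile : Option (List (String × String))) (fighter_b_profile : Option (List (String × String))) (matchup_data : List (String × String)) (event_summary : List (String × String)) : (List (String × String)) × (List (String × String)) :=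
  let winner := (PySem.Dict.mk prediction).getD "predicted_winner" ""
  let loser := pvLoser fighter_a_profile fighter_b_profile winner
  let method := (PySem.Dict.mk prediction).getD "method_tendency" ""
  let res := pvFields.foldl (pvStepA prediction winner loser method) (PySem.Dict.empty, PySem.Dict.empty)
  (res.1.items, res.2.items)

-- ===== PORT B =====
-- B's defaults table: the nine fields each mapped to their inferred template
def pvDefaults (winner loser method : String) : List (String × String) :=
  [("decision_structure", if PySem.Str.lower method = "decision" then pvDsDec winner else pvDsOther winner),
   ("energy_use", pvEnergy winner),
   ("fatigue_failure_points", pvFatigue winner),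
   ("mental_condition", pvMental),
   ("collapse_triggers", pvCollapse),
   ("main_tactical_edge", pvEdge),
   ("round_flow_projection", pvRoundFlow loser),
   ("corner_instructions", pvCorner),
   ("danger_zones", pvDanger)]

-- one iteration of B's 'for k, v in prediction.items(): if v and k in hydrated: …'
def pvStepB (st : PySem.Dict String String × PySem.Dict String String) (kv : String × String) :
    PySem.Dict String String × PySem.Dict String String :=
  if kv.2 ≠ "" ∧ st.1.contains kv.1 = true then
    (st.1.insert kv.1 kv.2, st.2.insert kv.1 "direct")
  else st

def hydrate_premium_tactical_fields_alt (prediction : List (String × String)) (fighter_a_profile : Option (List (String × String))) (fighter_b_profile : Option (List (String × String))) (matchup_data : List (String × String)) (event_summary : List (String × String)) : (List (String × String)) × (List (String × String)) :=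
  let winner := (PySem.Dict.mk prediction).getD "predicted_winner" ""
  let loser := pvLoser fighter_a_profile fighter_b_profile winner
  let method := (PySem.Dict.mk prediction).getD "method_tendency" ""
  let hydrated0 := PySem.Dict.mk (pvDefaults winner loser method)
  let sources0 := PySem.Dict.mk ((pvDefaults winner loser method).map (fun p => (p.1, "inferred")))
  let res := prediction.foldl pvStepB (hydrated0, sources0)
  (res.1.items, res.2.items)

-- ===== PRECONDITION & SPEC =====
-- Pre_ excludes (a) the inputs where A's loser expression raises AttributeError (None.get):
-- fighter_a_profile truthy with name == winner while fighter_b_profile is None, or the first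
-- test false, fighter_b_profile truthy, and fighter_a_profile None; and (b) assoc lists for
-- 'prediction' with duplicate keys, which do not represent any Python dict (a dict's keys are
-- unique, so no realizable Python input is excluded by (b)).
def Pre_hydrate_premium_tactical_fields (prediction : List (String × String)) (fighter_a_profile : Option (List (String × String))) (fighter_b_profile : Option (List (String × String))) (matchup_data : List (String × String)) (event_summary : List (String × String)) : Prop :=
  (prediction.map Prod.fst).Nodup ∧
  ¬ ((pvCond1 fighter_a_profile ((PySem.Dict.mk prediction).getD "predicted_winner" "") = true ∧ fighter_b_profile = none)
     ∨ (fighter_a_profile = none ∧ (match fighter_b_profile with | some q => decide (q ≠ []) | none => false) = true))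
instance (prediction : List (String × String)) (fighter_a_profile : Option (List (String × String))) (fighter_b_profile : Option (List (String × String))) (matchup_data : List (String × String)) (event_summary : List (String × String)) : Decidable (Pre_hydrate_premium_tactical_fields prediction fighter_a_profile fighter_b_profile matchup_data event_summary) := by unfold Pre_hydrate_premium_tactical_fields; infer_instance

def pvWitness_hydrate_premium_tactical_fields : (List (String × String)) × (Option (List (String × String))) × (Option (List (String × String))) × (List (String × String)) × (List (String × String)) :=
  ([("predicted_winner", "A")], some [("name", "A")], some [("name", "B")], [], [])

def Spec_hydrate_premium_tactical_fields (prediction : List (String × String)) (fighter_a_profile : Option (List (String × String))) (fighter_b_profile : Option (List (String × String))) (matchup_data : List (String × String)) (event_summary : List (String × String)) (out : (List (String × String)) × (List (String × String))) : Prop := out = hydrate_premium_tactical_fields_alt prediction fighter_a_profile fighter_b_profile matchup_data event_summary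
instance (prediction : List (String × String)) (fighter_a_profile : Option (List (String × String))) (fighter_b_profile : Option (List (String × String))) (matchup_data : List (String × String)) (event_summary : List (String × String)) (out : (List (String × String)) × (List (String × String))) : Decidable (Spec_hydrate_premium_tactical_fields prediction fighter_a_profile fighter_b_profile matchup_data event_summary out) := by unfold Spec_hydrate_premium_tactical_fields; infer_instance

-- ===== CLAIM (what is proved, stated in full; the proofs are below) =====
def Claim_equal_hydrate_premium_tactical_fields : Prop := ∀ (prediction : List (String × String)) (fighter_a_profile : Option (List (String × String))) (fighter_b_profile : Option (List (String × String))) (matchup_data : List (String × String)) (event_summary : List (String × String)), Dom_hydrate_premium_tactical_fields prediction fighter_a_profile fighter_b_profile matchup_data event_summary → Pre_hydrate_premium_tactical_fields prediction fighter_a_profile fighter_b_profile matchup_data event_summary → Spec_hydrate_premium_tactical_fields prediction fighter_a_profile fighter_b_profile matchup_data event_summary (hydrate_premium_tactical_fields prediction fighter_a_profile fighter_b_profile matchup_data event_summary)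

-- ===== LEMMAS AND PROOFS =====

-- the value A's loop stores in hydrated for a given field
def pvValA (prediction : List (String × String)) (winner loser method : String) (field : String) : String :=
  let val := (PySem.Dict.mk prediction).get? field
  if val.getD "" ≠ "" then val.getD ""
  else if field = "decision_structure" then
    if PySem.Str.lower method = "decision" then pvDsDec winner else pvDsOther winner
  else if field = "energy_use" then pvEnergy winner
  else if field = "fatigue_failure_points" then pvFatigue winner
  else if field = "mental_condition" then pvMental
  else if field = "collapse_triggers" then pvCollapse
  else if field = "main_tactical_edge" then pvEdge
  else if field = "round_flow_projection" then pvRoundFlow loser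
  else if field = "corner_instructions" then pvCorner
  else if field = "danger_zones" then pvDanger
  else ""

def pvSrcA (prediction : List (String × String)) (field : String) : String :=
  if ((PySem.Dict.mk prediction).get? field).getD "" ≠ "" then "direct" else "inferred"

set_option maxHeartbeats 1000000 in
theorem pvStepA_eq (prediction : List (String × String)) (winner loser method : String)
    (h s : PySem.Dict String String) (field : String) :
    pvStepA prediction winner loser method (h, s) field
      = (h.insert field (pvValA prediction winner loser method field),
         s.insert field (pvSrcA prediction field)) := by
  simp only [pvStepA, pvValA, pvSrcA]
  split_ifs <;> rfl

theorem pvFold_eq (prediction : List (String × String)) (winner loser method : String)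
    (fields : List String) (h s : PySem.Dict String String) :
    fields.foldl (pvStepA prediction winner loser method) (h, s)
      = (fields.foldl (fun d f => d.insert f (pvValA prediction winner loser method f)) h,
         fields.foldl (fun d f => d.insert f (pvSrcA prediction f)) s) := by
  induction fields generalizing h s with
  | nil => rfl
  | cons f fs ih =>
    simp only [List.foldl_cons, pvStepA_eq]
    exact ih _ _

theorem pvFold_items (val : String → String) :
    (pvFields.foldl (fun d f => d.insert f (val f)) PySem.Dict.empty).items
      = pvFields.map (fun f => (f, val f)) := by
  have := PySem.Dict.items_foldl_insert_fresh (l := pvFields) (k := fun f => f)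
    (v := fun f => val f) (d := (PySem.Dict.empty : PySem.Dict String String))
    (by intro a _; rfl) (by decide)
  simpa using this

-- inserting at a key of pvFields into a table over pvFields is an in-place map update
theorem pvMk_insert (h : String → String) (k v : String) (hk : k ∈ pvFields) :
    (PySem.Dict.mk (pvFields.map (fun f => (f, h f)))).insert k v
      = PySem.Dict.mk (pvFields.map (fun f => (f, if f = k then v else h f))) := by
  apply PySem.Dict.ext
  rw [PySem.Dict.items_insert_of_contains]
  · show (pvFields.map (fun f => (f, h f))).map (fun p => if p.1 == k then (k, v) else p)
        = pvFields.map (fun f => (f, if f = k then v else h f))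
    rw [List.map_map]
    apply List.map_congr_left
    intro f _
    by_cases hfk : f = k
    · simp [hfk]
    · simp [Function.comp, hfk, Ne.symm hfk]
  · rw [PySem.Dict.contains_eq_decide_mem_keys]
    simp only [PySem.Dict.keys]
    show decide (k ∈ (pvFields.map (fun f => (f, h f))).map Prod.fst) = true
    simp [List.map_map, hk]

-- what B's one pass leaves in a table entry: the prediction's value if present and truthy
-- (transformed by upd), the default otherwise
def pvOver (P : List (String × String)) (upd : String → String) (g : String → String) (f : String) : String :=
  match (PySem.Dict.mk P).get? f with
  | some v => if v = "" then g f else upd v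
  | none => g f

theorem pvContains_table (h : String → String) (k : String) :
    (PySem.Dict.mk (pvFields.map (fun f => (f, h f)))).contains k = decide (k ∈ pvFields) := by
  rw [PySem.Dict.contains_eq_decide_mem_keys]
  simp only [PySem.Dict.keys]
  show decide (k ∈ (pvFields.map (fun f => (f, h f))).map Prod.fst) = decide (k ∈ pvFields)
  simp [List.map_map]

theorem pvOver_congr (P : List (String × String)) (upd : String → String)
    (g g' : String → String) (f : String) (hg : g f = g' f) :
    pvOver P upd g f = pvOver P upd g' f := by
  unfold pvOver
  cases (PySem.Dict.mk P).get? f with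
  | none => simpa using hg
  | some v =>
    by_cases hv : v = "" <;> simp [hv, hg]

theorem pvFoldB_eq (P : List (String × String)) (hnd : (P.map Prod.fst).Nodup)
    (h s : String → String) :
    P.foldl pvStepB
        (PySem.Dict.mk (pvFields.map (fun f => (f, h f))),
         PySem.Dict.mk (pvFields.map (fun f => (f, s f))))
      = (PySem.Dict.mk (pvFields.map (fun f => (f, pvOver P id h f))),
         PySem.Dict.mk (pvFields.map (fun f => (f, pvOver P (fun _ => "direct") s f)))) := by
  induction P generalizing h s with
  | nil => rfl
  | cons kv rest ih =>
    obtain ⟨k, v⟩ := kv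
    have hnd2 : (k :: rest.map Prod.fst).Nodup := by simpa using hnd
    have hk_not : k ∉ rest.map Prod.fst := (List.nodup_cons.mp hnd2).1
    have hnd' : (rest.map Prod.fst).Nodup := (List.nodup_cons.mp hnd2).2
    have hrest_none : (PySem.Dict.mk rest).get? k = none := by
      rw [PySem.Dict.get?_eq_none_iff_not_mem_keys]
      simpa [PySem.Dict.keys] using hk_not
    have hover : ∀ (upd g : String → String) (f : String),
        pvOver ((k, v) :: rest) upd g f
          = pvOver rest upd (fun f' => if f' = k ∧ v ≠ "" then upd v else g f') f := by
      intro upd g f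
      by_cases hfk : f = k
      · subst hfk
        unfold pvOver
        rw [PySem.Dict.get?_mk_cons, hrest_none]
        by_cases hv : v = "" <;> simp [hv]
      · unfold pvOver
        rw [PySem.Dict.get?_mk_cons]
        have hbe : (k == f) = false := by simp [Ne.symm hfk]
        rw [hbe]
        simp only [Bool.false_eq_true, if_false]
        cases (PySem.Dict.mk rest).get? f with
        | none => simp [hfk]
        | some w => by_cases hw : w = "" <;> simp [hw, hfk]
    rw [List.foldl_cons]
    by_cases hguard : v ≠ "" ∧ k ∈ pvFields
    · have hstep : pvStepB
          (PySem.Dict.mk (pvFields.map (fun f => (f, h f))),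
           PySem.Dict.mk (pvFields.map (fun f => (f, s f)))) (k, v)
          = (PySem.Dict.mk (pvFields.map (fun f => (f, if f = k then v else h f))),
             PySem.Dict.mk (pvFields.map (fun f => (f, if f = k then "direct" else s f)))) := by
        unfold pvStepB
        rw [if_pos]
        · rw [pvMk_insert h k v hguard.2, pvMk_insert s k "direct" hguard.2]
        · refine ⟨hguard.1, ?_⟩
          show (PySem.Dict.mk (pvFields.map (fun f => (f, h f)))).contains k = true
          rw [pvContains_table]
          simpa using hguard.2
      rw [hstep, ih hnd']
      rw [Prod.mk.injEq]
      constructor <;>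
        · apply PySem.Dict.ext
          dsimp only
          apply List.map_congr_left
          intro f _
          rw [hover]
          rw [Prod.mk.injEq]
          refine ⟨rfl, ?_⟩
          apply pvOver_congr
          simp [hguard.1]
    · have hstep : pvStepB
          (PySem.Dict.mk (pvFields.map (fun f => (f, h f))),
           PySem.Dict.mk (pvFields.map (fun f => (f, s f)))) (k, v)
          = (PySem.Dict.mk (pvFields.map (fun f => (f, h f))),
             PySem.Dict.mk (pvFields.map (fun f => (f, s f)))) := by
        unfold pvStepB
        rw [if_neg]
        intro hcon
        obtain ⟨hv, hc⟩ := hcon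
        dsimp only at hv hc
        rw [pvContains_table] at hc
        exact hguard ⟨hv, by simpa using hc⟩
      rw [hstep, ih hnd']
      rw [Prod.mk.injEq]
      constructor <;>
        · apply PySem.Dict.ext
          dsimp only
          apply List.map_congr_left
          intro f hfmem
          rw [hover]
          rw [Prod.mk.injEq]
          refine ⟨rfl, ?_⟩
          apply pvOver_congr
          by_cases hfk : f = k
          · subst hfk
            have hv : v = "" := by
              by_contra hv
              exact hguard ⟨hv, hfmem⟩
            simp [hv]
          · simp [hfk]

-- pointwise agreement of A's stored value with B's overlay of the defaults table
theorem pvChain_eq (winner loser method : String) (f : String) (hf : f ∈ pvFields) :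
    (if f = "decision_structure" then
       (if PySem.Str.lower method = "decision" then pvDsDec winner else pvDsOther winner)
     else if f = "energy_use" then pvEnergy winner
     else if f = "fatigue_failure_points" then pvFatigue winner
     else if f = "mental_condition" then pvMental
     else if f = "collapse_triggers" then pvCollapse
     else if f = "main_tactical_edge" then pvEdge
     else if f = "round_flow_projection" then pvRoundFlow loser
     else if f = "corner_instructions" then pvCorner
     else if f = "danger_zones" then pvDanger
     else "")
      = (PySem.Dict.mk (pvDefaults winner loser method)).getD f "" := by
  fin_cases hf <;> rfl

theorem pvVal_agree (prediction : List (String × String)) (winner loser method : String)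
    (f : String) (hf : f ∈ pvFields) :
    pvValA prediction winner loser method f
      = pvOver prediction id
          (fun f' => (PySem.Dict.mk (pvDefaults winner loser method)).getD f' "") f := by
  unfold pvValA pvOver
  cases hp : (PySem.Dict.mk prediction).get? f with
  | none => simpa using pvChain_eq winner loser method f hf
  | some v =>
    by_cases hv : v = ""
    · simpa [hv] using pvChain_eq winner loser method f hf
    · simp [hv]

theorem pvSrc_agree (prediction : List (String × String)) (f : String) :
    pvSrcA prediction f = pvOver prediction (fun _ => "direct") (fun _ => "inferred") f := by
  unfold pvSrcA pvOver
  cases hp : (PySem.Dict.mk prediction).get? f with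
  | none => simp
  | some v => by_cases hv : v = "" <;> simp [hv]

-- the two initial tables of B, in the canonical pvFields.map form
theorem pvHyd0_eq (w l m : String) :
    PySem.Dict.mk (pvDefaults w l m)
      = PySem.Dict.mk (pvFields.map (fun f => (f, (PySem.Dict.mk (pvDefaults w l m)).getD f ""))) := by
  rfl

theorem pvSrc0_eq (w l m : String) :
    PySem.Dict.mk ((pvDefaults w l m).map (fun p => (p.1, "inferred")))
      = PySem.Dict.mk (pvFields.map (fun f => (f, (fun _ : String => "inferred") f))) := by
  rfl

-- ===== VERDICT (by name: the statement is the Claim_ definition above) =====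
set_option maxHeartbeats 1000000 in
theorem hydrate_premium_tactical_fields_spec : Claim_equal_hydrate_premium_tactical_fields := by
  intro p fa fb md es _ hpre
  obtain ⟨hnd, -⟩ := hpre
  unfold Spec_hydrate_premium_tactical_fields
  unfold hydrate_premium_tactical_fields hydrate_premium_tactical_fields_alt
  dsimp only
  rw [pvFold_eq, pvHyd0_eq, pvSrc0_eq, pvFoldB_eq p hnd]
  dsimp only
  rw [pvFold_items, pvFold_items, Prod.mk.injEq]
  constructor <;>
    · apply List.map_congr_left
      intro f hf
      rw [Prod.mk.injEq]
      refine ⟨rfl, ?_⟩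
      first
        | exact pvVal_agree p _ _ _ f hf
        | exact pvSrc_agree p f
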